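-- pv_equiv track=rewrite | github.com/Eyerusalem-Hailemariam/LeetCode | 2465-shifting-letters-ii/2465-shifting-letters-ii.py | shiftingLetters
-- ===== SOURCE A (Python) =====
-- from typing import List
--
-- def shiftingLetters(s: str, shifts: List[List[int]]) -> str:
--     n = len(s)
--     prefix_sum = [0] * (n + 1)
--
--     for start, end, direction in shifts:
--         prefix_sum[end + 1] += 1 if direction else -1
--         prefix_sum[start] += -1 if direction else 1
--     res = [ord(c) - ord('a') for c in s]
--     diff = 0
--     for i in reversed(range(len(prefix_sum))):
--         diff += prefix_sum[i]
--
--         res[i - 1] = (diff + res[i - 1]) % 26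
--     s = [chr(ord('a') + num) for num in res]
--     return "".join(s)
-- ===== SOURCE B (Python) =====
-- def shiftingLetters(s, shifts):
--     n = len(s)
--     shift = [0] * n
--     for start, end, direction in shifts:
--         d = 1 if direction else -1
--         for i in range(start, end + 1):
--             shift[i] += d
--     return "".join(chr(ord('a') + (ord(c) - ord('a') + shift[i]) % 26)
--                    for i, c in enumerate(s))
-- ===== Notes on version B (the rewrite author's own statement) =====
-- stated objective: simpler
-- what changed: Replaces the difference-array built at range endpoints plus a reversed suffix-sum accumulation pass (with its res[-1] wraparound step) by a direct per-range scan that adds the delta to every covered position of a plain shift array, then one forward pass builds the string.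
-- outside the precondition, e.g. on shiftingLetters('ab', [[-1, 0, 1]]): A returns 'aa', B returns 'bc'; on shiftingLetters('abc', [[2, 0, 1]]): A returns 'aac', B returns 'abc'
import Mathlib
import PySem

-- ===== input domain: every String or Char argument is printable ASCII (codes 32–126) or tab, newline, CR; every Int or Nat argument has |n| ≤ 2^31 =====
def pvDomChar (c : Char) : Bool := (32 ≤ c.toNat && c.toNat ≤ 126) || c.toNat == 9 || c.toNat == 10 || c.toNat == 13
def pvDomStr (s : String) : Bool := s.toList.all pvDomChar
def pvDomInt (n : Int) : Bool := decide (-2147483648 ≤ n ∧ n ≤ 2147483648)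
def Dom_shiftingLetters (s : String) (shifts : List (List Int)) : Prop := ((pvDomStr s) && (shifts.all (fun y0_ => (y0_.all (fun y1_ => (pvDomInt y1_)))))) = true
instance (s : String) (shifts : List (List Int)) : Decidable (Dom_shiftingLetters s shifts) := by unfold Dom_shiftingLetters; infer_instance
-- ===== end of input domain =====

-- B replaces A's difference array built at range endpoints + reversed suffix-sum pass by a direct
-- per-range scan adding the delta to every covered position; proved to return the same string on Pre_.

-- ===== PORT A =====
-- `for i in reversed(range(len(prefix_sum)))`: fuel `m+1` means the current index is `m`;
-- `res[i-1] = …` is ported with pySetD/pyGetD (exact incl. the negative-index wrap at i = 0).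
def pvBackLoop (ps : List Int) : Nat → Int → List Int → List Int
  | 0, _, res => res
  | m+1, diff, res =>
      pvBackLoop ps m (diff + PySem.List.pyGetD ps (m : Int) 0)
        (PySem.List.pySetD res ((m : Int) - 1)
          (PySem.Int.mod ((diff + PySem.List.pyGetD ps (m : Int) 0)
            + PySem.List.pyGetD res ((m : Int) - 1) 0) 26))

-- loop body of `for start, end, direction in shifts` (unpack and `+=` via pyGetD/pySetD; exact inside Pre_)
def pvStepA (ps : List Int) (sh : List Int) : List Int :=
  let st := PySem.List.pyGetD sh 0 0
  let en := PySem.List.pyGetD sh 1 0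
  let dir := PySem.List.pyGetD sh 2 0
  let ps1 := PySem.List.pySetD ps (en + 1)
      (PySem.List.pyGetD ps (en + 1) 0 + (if dir ≠ 0 then 1 else -1))
  PySem.List.pySetD ps1 st (PySem.List.pyGetD ps1 st 0 + (if dir ≠ 0 then -1 else 1))

def shiftingLetters (s : String) (shifts : List (List Int)) : String :=
  let cs := s.toList
  let n := cs.length
  let ps := List.foldl pvStepA (List.replicate (n+1) (0 : Int)) shifts
  let res0 : List Int := cs.map (fun c => (c.toNat : Int) - 97)
  let res := pvBackLoop ps (n+1) 0 res0
  String.mk (res.map (fun num => Char.ofNat (97 + num).toNat))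

-- ===== PORT B =====
-- loop body of `for start, end, direction in shifts` with the inner `for i in range(start, end+1)`
def pvStepB (arr : List Int) (sh : List Int) : List Int :=
  let st := PySem.List.pyGetD sh 0 0
  let en := PySem.List.pyGetD sh 1 0
  let d : Int := if PySem.List.pyGetD sh 2 0 ≠ 0 then 1 else -1
  (PySem.List.pyRange st (en + 1) 1).foldl
    (fun a i => PySem.List.pySetD a i (PySem.List.pyGetD a i 0 + d)) arr

def shiftingLetters_alt (s : String) (shifts : List (List Int)) : String :=
  let cs := s.toList
  let n := cs.length
  let arr := List.foldl pvStepB (List.replicate n (0 : Int)) shifts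
  String.mk ((PySem.List.enumerate cs 0).map (fun p =>
    Char.ofNat (97 + (PySem.Int.mod ((p.2.toNat : Int) - 97 + PySem.List.pyGetD arr p.1 0) 26)).toNat))

-- ===== PRECONDITION & SPEC =====
-- Pre_ = the problem's natural domain: s nonempty and every shift a triple [start, end, direction]
-- with 0 ≤ start ≤ end < len(s).  Outside it A raises (IndexError on empty s or an out-of-range
-- endpoint, ValueError on a non-triple) or — for a negative or reversed (start > end) endpoint that
-- Python's negative indexing happens to accept — A and B both return accidental, implementation-shaped
-- values that no caller would specify, so those corners are excluded rather than matched.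
def Pre_shiftingLetters (s : String) (shifts : List (List Int)) : Prop :=
  s.toList ≠ [] ∧ ∀ sh ∈ shifts, sh.length = 3 ∧
    0 ≤ PySem.List.pyGetD sh 0 0 ∧
    PySem.List.pyGetD sh 0 0 ≤ PySem.List.pyGetD sh 1 0 ∧
    PySem.List.pyGetD sh 1 0 < (s.toList.length : Int)
instance (s : String) (shifts : List (List Int)) : Decidable (Pre_shiftingLetters s shifts) := by
  unfold Pre_shiftingLetters; infer_instance

def pvWitness_shiftingLetters : String × List (List Int) := ("ab", [[0, 1, 1], [1, 1, 0]])

def Spec_shiftingLetters (s : String) (shifts : List (List Int)) (out : String) : Prop := out = shiftingLetters_alt s shifts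
instance (s : String) (shifts : List (List Int)) (out : String) : Decidable (Spec_shiftingLetters s shifts out) := by unfold Spec_shiftingLetters; infer_instance

-- ===== CLAIM (what is proved, stated in full; the proofs are below) =====
def Claim_equal_shiftingLetters : Prop := ∀ (s : String) (shifts : List (List Int)), Dom_shiftingLetters s shifts → Pre_shiftingLetters s shifts → Spec_shiftingLetters s shifts (shiftingLetters s shifts)

-- ===== LEMMAS AND PROOFS =====

-- shorthand for the element-wise conditions Pre_ gives on one shift triple
def pvOk (n : Nat) (sh : List Int) : Prop :=
  0 ≤ PySem.List.pyGetD sh 0 0 ∧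
  PySem.List.pyGetD sh 0 0 ≤ PySem.List.pyGetD sh 1 0 ∧
  PySem.List.pyGetD sh 1 0 < (n : Int)

-- the common spec: net shift applied to position j
def pvF (shifts : List (List Int)) (j : Int) : Int :=
  (shifts.map (fun sh =>
    if PySem.List.pyGetD sh 0 0 ≤ j ∧ j ≤ PySem.List.pyGetD sh 1 0 then
      (if PySem.List.pyGetD sh 2 0 ≠ 0 then (1 : Int) else -1) else 0)).sum

-- segment sum of a list of Ints over indices [a, b)
def pvS (ps : List Int) (a b : Nat) : Int := ∑ k ∈ Finset.Ico a b, PySem.List.pyGetD ps (k : Int) 0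

-- per-shift contribution of pvStepA to pvS over [a, b)
def pvC (a b : Nat) (sh : List Int) : Int :=
  (if (a : Int) ≤ PySem.List.pyGetD sh 1 0 + 1 ∧ PySem.List.pyGetD sh 1 0 + 1 < (b : Int) then
      (if PySem.List.pyGetD sh 2 0 ≠ 0 then (1 : Int) else -1) else 0)
  + (if (a : Int) ≤ PySem.List.pyGetD sh 0 0 ∧ PySem.List.pyGetD sh 0 0 < (b : Int) then
      (if PySem.List.pyGetD sh 2 0 ≠ 0 then (-1 : Int) else 1) else 0)

def pvFA (shifts : List (List Int)) (a b : Nat) : Int := (shifts.map (pvC a b)).sum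

lemma pv_getD_setD (xs : List Int) (i j : Nat) (v : Int) (h : i < xs.length) :
    PySem.List.pyGetD (PySem.List.pySetD xs (i : Int) v) (j : Int) 0
      = if j = i then v else PySem.List.pyGetD xs (j : Int) 0 :=
  PySem.List.pyGetD_pySetD_natCast xs i j v 0 h

lemma pv_setD_neg_one (xs : List Int) (v : Int) (h : 0 < xs.length) :
    PySem.List.pySetD xs (-1) v = xs.set (xs.length - 1) v := by
  simp [PySem.List.pySetD, PySem.List.pySet?, PySem.List.pyIdx?]
  rw [if_pos (by omega : 1 ≤ xs.length)]; rfl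

lemma pv_lenRange (d : Int) : ∀ (r : List Int) (arr : List Int),
    (r.foldl (fun a i => PySem.List.pySetD a i (PySem.List.pyGetD a i 0 + d)) arr).length = arr.length := by
  intro r
  induction r with
  | nil => intro arr; rfl
  | cons x t ih => intro arr; simp [List.foldl_cons, ih, PySem.List.length_pySetD]

lemma pv_lenA : ∀ (shifts : List (List Int)) (ps : List Int),
    (List.foldl pvStepA ps shifts).length = ps.length := by
  intro shifts
  induction shifts with
  | nil => intro ps; rfl
  | cons sh t ih => intro ps; simp [List.foldl_cons, ih, pvStepA, PySem.List.length_pySetD]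

lemma pv_lenBack (ps : List Int) : ∀ (m : Nat) (diff : Int) (res : List Int),
    (pvBackLoop ps m diff res).length = res.length := by
  intro m
  induction m with
  | zero => intro diff res; rfl
  | succ m ih => intro diff res; simp [pvBackLoop, ih, PySem.List.length_pySetD]

lemma pv_rangeAdd (d : Int) : ∀ (cnt : Nat) (a b : Int) (arr : List Int),
    (b - a).toNat = cnt → 0 ≤ a → b ≤ (arr.length : Int) → ∀ (j : Nat),
    PySem.List.pyGetD
      ((PySem.List.pyRange a b 1).foldl
        (fun x i => PySem.List.pySetD x i (PySem.List.pyGetD x i 0 + d)) arr) (j : Int) 0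
    = PySem.List.pyGetD arr (j : Int) 0 + (if a ≤ (j : Int) ∧ (j : Int) < b then d else 0) := by
  intro cnt
  induction cnt with
  | zero =>
      intro a b arr hc ha hb j
      rw [PySem.List.pyRange_one_eq_nil (by omega)]
      simp only [List.foldl_nil]
      rw [if_neg (by omega)]; ring
  | succ m ih =>
      intro a b arr hc ha hb j
      rw [PySem.List.pyRange_one_cons (by omega)]
      simp only [List.foldl_cons]
      have ha' : a = ((a.toNat : Nat) : Int) := by omega
      have hlt : a.toNat < arr.length := by omega
      rw [ih (a+1) b _ (by omega) (by omega)
            (by simp only [PySem.List.length_pySetD]; omega) j]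
      rw [ha', pv_getD_setD arr a.toNat j _ hlt]
      by_cases hj : j = a.toNat
      · subst hj
        rw [if_pos rfl, if_neg (by omega), if_pos (by omega)]
        ring
      · rw [if_neg hj]
        congr 1
        exact if_congr (by omega) rfl rfl

lemma pv_foldB (n : Nat) : ∀ (shifts : List (List Int)) (arr : List Int), arr.length = n →
    (∀ sh ∈ shifts, pvOk n sh) → ∀ (j : Nat),
    PySem.List.pyGetD (List.foldl pvStepB arr shifts) (j : Int) 0
      = PySem.List.pyGetD arr (j : Int) 0 + pvF shifts (j : Int) := by
  intro shifts
  induction shifts with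
  | nil => intro arr _ _ j; simp [pvF]
  | cons sh t ih =>
      intro arr hlen hok j
      obtain ⟨h0, h1, h2⟩ := hok sh (List.mem_cons_self ..)
      simp only [List.foldl_cons]
      rw [ih (pvStepB arr sh) (by simp [pvStepB, pv_lenRange, hlen])
            (fun x hx => hok x (List.mem_cons_of_mem _ hx)) j]
      show PySem.List.pyGetD (pvStepB arr sh) _ _ + _ = _
      rw [pvStepB]
      rw [pv_rangeAdd _ _ _ _ _ rfl h0 (by omega) j]
      simp only [pvF, List.map_cons, List.sum_cons]
      have : ((PySem.List.pyGetD sh 0 0 ≤ (j:Int) ∧ (j:Int) < PySem.List.pyGetD sh 1 0 + 1) ↔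
              (PySem.List.pyGetD sh 0 0 ≤ (j:Int) ∧ (j:Int) ≤ PySem.List.pyGetD sh 1 0)) := by omega
      rw [if_congr this rfl rfl]
      split_ifs <;> ring

lemma pv_S_setD (ps : List Int) (i : Nat) (v : Int) (hi : i < ps.length) (a b : Nat) :
    pvS (PySem.List.pySetD ps (i : Int) v) a b
      = pvS ps a b + (if a ≤ i ∧ i < b then v - PySem.List.pyGetD ps (i : Int) 0 else 0) := by
  unfold pvS
  have h1 : ∀ k ∈ Finset.Ico a b,
      PySem.List.pyGetD (PySem.List.pySetD ps (i : Int) v) (k : Int) 0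
        = PySem.List.pyGetD ps (k : Int) 0
          + (if k = i then v - PySem.List.pyGetD ps (i : Int) 0 else 0) := by
    intro k _
    rw [pv_getD_setD ps i k v hi]
    by_cases hk : k = i
    · subst hk; simp
    · simp [hk]
  rw [Finset.sum_congr rfl h1, Finset.sum_add_distrib]
  congr 1
  rw [Finset.sum_ite_eq' (Finset.Ico a b) i
    (fun _ => v - PySem.List.pyGetD ps (i : Int) 0)]
  simp [Finset.mem_Ico]


lemma pv_S_setD_int (ps : List Int) (i v : Int) (h0 : 0 ≤ i) (hi : i < (ps.length : Int)) (a b : Nat) :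
    pvS (PySem.List.pySetD ps i v) a b
      = pvS ps a b + (if (a : Int) ≤ i ∧ i < (b : Int) then v - PySem.List.pyGetD ps i 0 else 0) := by
  lift i to Nat using h0 with k
  rw [pv_S_setD ps k v (by omega) a b]
  congr 1
  exact if_congr (by omega) rfl rfl

lemma pv_foldA (n a b : Nat) (hb : b ≤ n + 1) : ∀ (shifts : List (List Int)) (ps : List Int),
    ps.length = n + 1 → (∀ sh ∈ shifts, pvOk n sh) →
    pvS (List.foldl pvStepA ps shifts) a b = pvS ps a b + pvFA shifts a b := by
  intro shifts
  induction shifts with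
  | nil => intro ps _ _; simp [pvFA]
  | cons sh t ih =>
      intro ps hlen hok
      obtain ⟨h0, h1, h2⟩ := hok sh (List.mem_cons_self ..)
      simp only [List.foldl_cons]
      rw [ih (pvStepA ps sh) (by simp [pvStepA, PySem.List.length_pySetD, hlen])
            (fun x hx => hok x (List.mem_cons_of_mem _ hx))]
      have hstep : pvS (pvStepA ps sh) a b = pvS ps a b + pvC a b sh := by
        simp only [pvStepA]
        rw [pv_S_setD_int _ (PySem.List.pyGetD sh 0 0) _ h0
              (by simp only [PySem.List.length_pySetD]; omega) a b]
        rw [pv_S_setD_int ps (PySem.List.pyGetD sh 1 0 + 1) _ (by omega) (by omega) a b]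
        rw [pvC]
        split_ifs <;> ring
      rw [hstep]
      simp only [pvFA, List.map_cons, List.sum_cons]
      ring

lemma pv_FA_zero (n : Nat) : ∀ (shifts : List (List Int)), (∀ sh ∈ shifts, pvOk n sh) →
    pvFA shifts 0 (n + 1) = 0 := by
  intro shifts
  induction shifts with
  | nil => intro _; simp [pvFA]
  | cons sh t ih =>
      intro hok
      obtain ⟨h0, h1, h2⟩ := hok sh (List.mem_cons_self ..)
      simp only [pvFA, List.map_cons, List.sum_cons] at *
      rw [ih (fun x hx => hok x (List.mem_cons_of_mem _ hx))]
      rw [pvC]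
      split_ifs
      all_goals try ring
      all_goals omega

lemma pv_FA_eq (n j : Nat) (hj : j < n) : ∀ (shifts : List (List Int)), (∀ sh ∈ shifts, pvOk n sh) →
    pvFA shifts (j + 1) (n + 1) = pvF shifts (j : Int) := by
  intro shifts
  induction shifts with
  | nil => intro _; simp [pvFA, pvF]
  | cons sh t ih =>
      intro hok
      obtain ⟨h0, h1, h2⟩ := hok sh (List.mem_cons_self ..)
      simp only [pvFA, pvF, List.map_cons, List.sum_cons] at *
      rw [ih (fun x hx => hok x (List.mem_cons_of_mem _ hx))]
      congr 1
      rw [pvC]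
      split_ifs
      all_goals try ring
      all_goals omega

lemma pv_getE (l : List Int) (k : Nat) (h : k < l.length) :
    PySem.List.pyGetD l (k : Int) 0 = l[k] := by
  rw [PySem.List.pyGetD_natCast]; exact List.getD_eq_getElem l 0 h

lemma pv_getD_repl (n k : Nat) : PySem.List.pyGetD (List.replicate n (0 : Int)) (k : Int) 0 = 0 := by
  rw [PySem.List.pyGetD_natCast]
  rcases lt_or_ge k n with h | h
  · rw [List.getD_eq_getElem _ _ (by simpa using h)]; simp
  · rw [List.getD_eq_default _ _ (by simpa using h)]

lemma pv_S_repl (n a b : Nat) : pvS (List.replicate n (0 : Int)) a b = 0 := by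
  unfold pvS
  exact Finset.sum_eq_zero (fun k _ => pv_getD_repl n k)

lemma pv_mod_mod (x : Int) : PySem.Int.mod (PySem.Int.mod x 26) 26 = PySem.Int.mod x 26 := by
  simp only [PySem.Int.mod_eq_emod_of_pos (by norm_num : (0:Int) < 26)]
  exact Int.emod_emod_of_dvd x dvd_rfl

lemma pv_back (ps : List Int) (n : Nat) (hn : 0 < n) :
    ∀ (m : Nat), m ≤ n → ∀ (diff : Int) (res : List Int), res.length = n → ∀ (j : Nat), j < n →
    PySem.List.pyGetD (pvBackLoop ps m diff res) (j : Int) 0 =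
      if j + 2 ≤ m then PySem.Int.mod (diff + pvS ps (j+1) m + PySem.List.pyGetD res (j : Int) 0) 26
      else if j = n - 1 ∧ 0 < m then PySem.Int.mod (diff + pvS ps 0 m + PySem.List.pyGetD res (j : Int) 0) 26
      else PySem.List.pyGetD res (j : Int) 0 := by
  intro m
  induction m with
  | zero =>
      intro _ diff res hres j hj
      rw [if_neg (by omega), if_neg (by omega)]
      rfl
  | succ m ih =>
      intro hm diff res hres j hj
      by_cases hm0 : m = 0
      · subst hm0
        -- single step i = 0: writes res[-1], i.e. position n-1
        have e1 : ((0 : Nat) : Int) - 1 = (-1 : Int) := by norm_num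
        have e2 : PySem.List.pyGetD res (-1 : Int) 0 = res[n-1]'(by omega) := by
          have := PySem.List.pyGetD_neg_ofNat res 1 0 (by omega) (by omega)
          simpa [hres] using this
        simp only [pvBackLoop]
        rw [e1, e2]
        rw [pv_setD_neg_one res _ (by omega)]
        rw [PySem.List.pyGetD_natCast, List.getD_eq_getElem _ _ (by simpa [hres] using hj)]
        rw [List.getElem_set]
        by_cases hj1 : j = n - 1
        · rw [if_pos (by omega : res.length - 1 = j), if_neg (by omega), if_pos (by exact ⟨hj1, by omega⟩)]
          have : pvS ps 0 1 = PySem.List.pyGetD ps ((0 : Nat) : Int) 0 := by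
            unfold pvS
            rw [show Finset.Ico 0 1 = {0} from rfl, Finset.sum_singleton]
          rw [this, pv_getE res j (by omega)]
          subst hj1
          rfl
        · rw [if_neg (by omega), if_neg (by omega), if_neg (by omega)]
          rw [pv_getE res j (by omega)]
      · -- m ≥ 1 : writes position m-1
        have e1 : ((m : Nat) : Int) - 1 = ((m - 1 : Nat) : Int) := by omega
        show PySem.List.pyGetD (pvBackLoop ps m _ _) (j : Int) 0 = _
        rw [ih (by omega) _ _ (by simp [PySem.List.length_pySetD, hres]) j hj]
        rw [e1]
        rw [pv_getD_setD res (m-1) j _ (by omega)]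
        have hsum1 : j + 1 ≤ m → pvS ps (j+1) (m+1) = pvS ps (j+1) m + PySem.List.pyGetD ps ((m : Nat) : Int) 0 := by
          intro h; unfold pvS; rw [Finset.sum_Ico_succ_top h]
        have hsum0 : pvS ps 0 (m+1) = pvS ps 0 m + PySem.List.pyGetD ps ((m : Nat) : Int) 0 := by
          unfold pvS; rw [Finset.sum_Ico_succ_top (by omega)]
        by_cases hja : j + 2 ≤ m
        · -- untouched by this step, first branch both sides
          rw [if_pos hja, if_neg (by omega : ¬ j = m - 1), if_pos (by omega), hsum1 (by omega)]
          congr 1; ring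
        · by_cases hjb : j = m - 1
          · -- the position written by this step
            rw [if_neg hja, if_pos hjb, if_neg (by omega : ¬ (j = n - 1 ∧ 0 < m)), if_pos (by omega)]
            rw [hsum1 (by omega)]
            have hz : pvS ps (j+1) m = 0 := by
              unfold pvS
              rw [show j + 1 = m from by omega, Finset.Ico_self, Finset.sum_empty]
            rw [hz, show j = m - 1 from hjb]
            congr 1; ring
          · rw [if_neg hja, if_neg hjb]
            by_cases hjc : j = n - 1
            · rw [if_pos (by exact ⟨hjc, by omega⟩), if_neg (by omega), if_pos (by exact ⟨hjc, by omega⟩), hsum0]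
              congr 1; ring
            · rw [if_neg (by omega), if_neg (by omega), if_neg (by omega)]

-- ===== VERDICT (by name: the statement is the Claim_ definition above) =====
theorem shiftingLetters_spec : Claim_equal_shiftingLetters := by
  intro s shifts _ hpre
  obtain ⟨hne, hsh⟩ := hpre
  unfold Spec_shiftingLetters shiftingLetters shiftingLetters_alt
  set cs := s.toList with hcs
  set n := cs.length with hn
  have hn0 : 0 < n := List.length_pos_iff.mpr hne
  have hok : ∀ sh ∈ shifts, pvOk n sh := fun sh h =>
    ⟨(hsh sh h).2.1, (hsh sh h).2.2.1, (hsh sh h).2.2.2⟩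
  set psF := List.foldl pvStepA (List.replicate (n+1) (0 : Int)) shifts with hpsF
  set arrB := List.foldl pvStepB (List.replicate n (0 : Int)) shifts with harrB
  set res0 : List Int := cs.map (fun c => (c.toNat : Int) - 97) with hres0
  show String.mk ((pvBackLoop psF (n+1) 0 res0).map (fun num => Char.ofNat (97 + num).toNat))
      = String.mk ((PySem.List.enumerate cs 0).map (fun p =>
          Char.ofNat (97 + (PySem.Int.mod ((p.2.toNat : Int) - 97 + PySem.List.pyGetD arrB p.1 0) 26)).toNat))
  have hres0len : res0.length = n := by simp [hres0]; omega
  have hpsLen : psF.length = n + 1 := by rw [hpsF, pv_lenA]; simp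
  have hSzero : pvS psF 0 (n+1) = 0 := by
    rw [hpsF, pv_foldA n 0 (n+1) le_rfl shifts _ (by simp) hok, pv_S_repl, pv_FA_zero n shifts hok]
    norm_num
  have hSF : ∀ j : Nat, j < n → pvS psF (j+1) (n+1) = pvF shifts (j : Int) := by
    intro j hj
    rw [hpsF, pv_foldA n (j+1) (n+1) le_rfl shifts _ (by simp) hok, pv_S_repl,
      pv_FA_eq n j hj shifts hok]
    ring
  have hB : ∀ j : Nat, PySem.List.pyGetD arrB (j : Int) 0 = pvF shifts (j : Int) := by
    intro j
    rw [harrB, pv_foldB n shifts _ (by simp) hok j, pv_getD_repl]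
    ring
  -- characterize A's final residue list
  have hA : ∀ j : Nat, (hj : j < n) →
      PySem.List.pyGetD (pvBackLoop psF (n+1) 0 res0) (j : Int) 0
        = PySem.Int.mod (pvF shifts (j : Int) + PySem.List.pyGetD res0 (j : Int) 0) 26 := by
    intro j hj
    have e1 : ((n : Nat) : Int) - 1 = ((n - 1 : Nat) : Int) := by omega
    show PySem.List.pyGetD (pvBackLoop psF n _ _) (j : Int) 0 = _
    rw [pv_back psF n hn0 n le_rfl _ _ (by simp [PySem.List.length_pySetD, hres0len]) j hj]
    rw [e1, pv_getD_setD res0 (n-1) j _ (by omega)]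
    by_cases hja : j + 2 ≤ n
    · rw [if_pos hja, if_neg (by omega : ¬ j = n - 1)]
      rw [← hSF j hj]
      unfold pvS
      rw [Finset.sum_Ico_succ_top (by omega : j + 1 ≤ n)]
      congr 1; ring
    · have hjn : j = n - 1 := by omega
      rw [if_neg hja, if_pos (by exact ⟨hjn, by omega⟩), if_pos hjn]
      have h0 : (0 : Int) + PySem.List.pyGetD psF ((n : Nat) : Int) 0 + pvS psF 0 n = pvS psF 0 (n+1) := by
        unfold pvS
        rw [Finset.sum_Ico_succ_top (by omega : 0 ≤ n)]
        ring
      have hw : PySem.Int.mod ((0 : Int) + PySem.List.pyGetD psF ((n : Nat) : Int) 0 + pvS psF 0 n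
            + PySem.Int.mod ((0 : Int) + PySem.List.pyGetD psF ((n : Nat) : Int) 0
                + PySem.List.pyGetD res0 ((n - 1 : Nat) : Int) 0) 26) 26
          = PySem.Int.mod ((0 : Int) + PySem.List.pyGetD psF ((n : Nat) : Int) 0
                + PySem.List.pyGetD res0 ((n - 1 : Nat) : Int) 0) 26 := by
        rw [h0, hSzero]
        rw [show ((0 : Int) + PySem.Int.mod ((0 : Int) + PySem.List.pyGetD psF ((n : Nat) : Int) 0
                + PySem.List.pyGetD res0 ((n - 1 : Nat) : Int) 0) 26)
            = PySem.Int.mod ((0 : Int) + PySem.List.pyGetD psF ((n : Nat) : Int) 0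
                + PySem.List.pyGetD res0 ((n - 1 : Nat) : Int) 0) 26 from by ring]
        exact pv_mod_mod _
      rw [hw, ← hSF j hj]
      have : pvS psF (j+1) (n+1) = PySem.List.pyGetD psF ((n : Nat) : Int) 0 := by
        unfold pvS
        rw [show j + 1 = n from by omega, Finset.sum_Ico_succ_top (by omega : n ≤ n),
          Finset.Ico_self, Finset.sum_empty]
        ring
      rw [this, hjn]
      congr 1; ring
  congr 1
  apply List.ext_getElem
  · simp [pv_lenBack, hres0len, PySem.List.length_enumerate]
    omega
  · intro i h1 h2
    have hi : i < n := by
      simpa [pv_lenBack, hres0len] using h1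
    rw [List.getElem_map, List.getElem_map, PySem.List.getElem_enumerate]
    rw [← pv_getE _ i (by rw [pv_lenBack, hres0len]; exact hi), hA i hi]
    dsimp only
    rw [zero_add, hB i]
    have : PySem.List.pyGetD res0 (i : Int) 0 = ((cs[i]'(by omega)).toNat : Int) - 97 := by
      rw [pv_getE res0 i (by omega)]
      simp [hres0]
    rw [this]
    congr 3
    ring
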